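-- pv_equiv track=rewrite | github.com/Dittam/Real-Time-Object-Detection | a1.py | zip_length
-- ===== SOURCE A (Python) =====
-- def zip_length(gene):
--     '''(str) -> int
--     Given (gene) a string that represents a gene, will return the zip length;
--     the number of consecutively valid nucleotide pairs a gene forms with itself
--     starting from the first and last indices and moving inward.
--     REQ: gene must be comprised of only 'A', 'T', 'G', 'C'
--     REQ: gene cannot be empty
--     >>>AGTCTCGCT
--     2
--     '''
--     # create list with all valid nucleoride pairs
--     possible_pairs = ['AT', 'TA', 'GC', 'CG']
--     # initial variables for zip-length and validity of nucleotide pairs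
--     zip_length, valid_pairs = 0, True
--     index = 0
--     # run loop as long as index is less than half gene length and nucleotide
--     # pairs are valid
--     while (index < len(gene) // 2) and valid_pairs:
--         # Combine nucleotides starting with first and last indexes and moving
--         # inward as index increases
--         pairs = gene[index] + gene[-(index + 1)]
--         # check if nucleotide pair is valid
--         if pairs in possible_pairs:
--             # add 1 to zip length of gene
--             zip_length += 1
--         else:
--             valid_pairs = False
--         # continue to next index
--         index += 1
--     # return the total zip length of the gene
--     return zip_length
-- ===== SOURCE B (Python) =====
-- def zip_length(gene):
--     possible_pairs = ['AT', 'TA', 'GC', 'CG']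
--     if len(gene) < 2:
--         return 0
--     if gene[0] + gene[-1] in possible_pairs:
--         return 1 + zip_length(gene[1:-1])
--     return 0
-- ===== Notes on version B (the rewrite author's own statement) =====
-- stated objective: simpler
-- what changed: Replaces the index/flag while-loop with a recursion that peels the first and last characters and recurses on the middle slice, with no index arithmetic or validity flag.
import Mathlib
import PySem

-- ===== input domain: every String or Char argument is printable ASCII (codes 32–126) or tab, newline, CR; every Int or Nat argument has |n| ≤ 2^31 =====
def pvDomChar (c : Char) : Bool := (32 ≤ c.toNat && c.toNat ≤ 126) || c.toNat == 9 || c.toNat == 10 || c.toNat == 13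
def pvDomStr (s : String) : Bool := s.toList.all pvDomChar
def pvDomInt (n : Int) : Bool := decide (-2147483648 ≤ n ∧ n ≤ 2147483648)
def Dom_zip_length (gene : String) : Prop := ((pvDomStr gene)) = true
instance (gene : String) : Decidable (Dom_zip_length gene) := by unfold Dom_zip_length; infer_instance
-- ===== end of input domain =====

-- B replaces A's index/flag while-loop by a recursion peeling the first and last characters; objective: simpler.


-- shared pair test: `pairs in ['AT','TA','GC','CG']` (identical in both Pythons)
def possiblePair (a b : Char) : Bool := ["AT", "TA", "GC", "CG"].contains (String.mk [a, b])

-- ===== PORT A =====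
-- the while loop: state (index, zip_length, valid_pairs); `half` = len(gene) // 2
def zipLoopA (g : List Char) (half index : Nat) (z : Int) (valid : Bool) : Int :=
  if h : index < half ∧ valid = true then
    -- pairs = gene[index] + gene[-(index + 1)]
    match PySem.List.pyGet? g (index : Int), PySem.List.pyGet? g (-((index : Int) + 1)) with
    | some a, some b =>
        if possiblePair a b then zipLoopA g half (index + 1) (z + 1) valid
        else zipLoopA g half (index + 1) z false
    | _, _ => z
  else z
termination_by half - index
decreasing_by all_goals (obtain ⟨h1, _⟩ := h; omega)

def zip_length (gene : String) : Int :=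
  zipLoopA gene.toList (gene.toList.length / 2) 0 0 true

-- ===== PORT B =====
-- recursion peeling both ends: gene[0] + gene[-1], recurse on gene[1:-1]
def zipRecB (g : List Char) : Int :=
  match g with
  | [] => 0
  | [_] => 0
  | a :: c :: rest =>
      if possiblePair a ((c :: rest).getLast (List.cons_ne_nil _ _)) then
        1 + zipRecB ((c :: rest).dropLast)
      else 0
termination_by g.length
decreasing_by simp

def zip_length_alt (gene : String) : Int :=
  zipRecB gene.toList

-- ===== PRECONDITION & SPEC =====
def Spec_zip_length (gene : String) (out : Int) : Prop := out = zip_length_alt gene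
instance (gene : String) (out : Int) : Decidable (Spec_zip_length gene out) := by unfold Spec_zip_length; infer_instance

-- ===== CLAIM (what is proved, stated in full; the proofs are below) =====
def Claim_equal_zip_length : Prop := ∀ (gene : String), Dom_zip_length gene → Spec_zip_length gene (zip_length gene)

-- ===== LEMMAS AND PROOFS =====

theorem zipLoopA_stop (g : List Char) (half index : Nat) (z : Int) (v : Bool)
    (h : ¬ (index < half ∧ v = true)) : zipLoopA g half index z v = z := by
  conv_lhs => rw [zipLoopA]
  rw [dif_neg h]

theorem zipLoopA_false (g : List Char) (half index : Nat) (z : Int) :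
    zipLoopA g half index z false = z :=
  zipLoopA_stop g half index z false (by simp)

theorem zipLoopA_step (g : List Char) (half index : Nat) (z : Int) (h : index < half) :
    zipLoopA g half index z true =
      match PySem.List.pyGet? g (index : Int), PySem.List.pyGet? g (-((index : Int) + 1)) with
      | some a, some b =>
          if possiblePair a b then zipLoopA g half (index + 1) (z + 1) true
          else zipLoopA g half (index + 1) z false
      | _, _ => z := by
  conv_lhs => rw [zipLoopA]
  rw [dif_pos ⟨h, rfl⟩]

theorem zipLoopA_acc (g : List Char) (half : Nat) :
    ∀ n index, half - index ≤ n → ∀ (z : Int),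
      zipLoopA g half index z true = z + zipLoopA g half index 0 true := by
  intro n
  induction n with
  | zero =>
      intro index hle z
      rw [zipLoopA_stop _ _ _ _ _ (by omega), zipLoopA_stop _ _ _ _ _ (by omega)]
      ring
  | succ n ih =>
      intro index hle z
      by_cases hlt : index < half
      · rw [zipLoopA_step _ _ _ z hlt, zipLoopA_step _ _ _ 0 hlt]
        cases hA : PySem.List.pyGet? g (index : Int) with
        | none => simp
        | some a =>
          cases hB : PySem.List.pyGet? g (-((index : Int) + 1)) with
          | none => simp
          | some b =>
            simp only
            by_cases hp : possiblePair a b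
            · rw [if_pos hp, if_pos hp,
                  ih (index + 1) (by omega) (z + 1), ih (index + 1) (by omega) (0 + 1)]
              ring
            · rw [if_neg hp, if_neg hp, zipLoopA_false, zipLoopA_false]; ring
      · rw [zipLoopA_stop _ _ _ _ _ (by omega), zipLoopA_stop _ _ _ _ _ (by omega)]
        ring

theorem pyGet?_wrap_pos (a b : Char) (mid : List Char) (i : Nat) (hi : i < mid.length) :
    PySem.List.pyGet? (a :: (mid ++ [b])) (((i : Int) + 1)) = some mid[i] := by
  have h1 : ((i : Int) + 1) = ((i + 1 : Nat) : Int) := by push_cast; ring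
  rw [h1, PySem.List.pyGet?_natCast]
  simp [List.getElem?_append, hi]

theorem pyGet?_wrap_neg (a b : Char) (mid : List Char) (i : Nat) (hi : i < mid.length) :
    PySem.List.pyGet? (a :: (mid ++ [b])) (-(((i : Int) + 1) + 1)) =
      some mid[mid.length - 1 - i] := by
  have hlen2 : (a :: (mid ++ [b])).length = mid.length + 2 := by simp
  have h1 : (-(((i : Int) + 1) + 1)) = -((i + 2 : Nat) : Int) := by push_cast; ring
  rw [h1, PySem.List.pyGet?_neg_natCast _ _ (by omega) (by rw [hlen2]; omega)]
  rw [hlen2]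
  have hk : mid.length + 2 - (i + 2) = (mid.length - 1 - i) + 1 := by omega
  rw [hk, List.getElem?_cons_succ]
  have h2 : mid.length - 1 - i < mid.length := by omega
  rw [List.getElem?_append_left h2, List.getElem?_eq_getElem h2]

theorem pyGet?_neg_mid (mid : List Char) (i : Nat) (hi : i < mid.length) :
    PySem.List.pyGet? mid (-((i : Int) + 1)) = some mid[mid.length - 1 - i] := by
  have h1 : (-((i : Int) + 1)) = -((i + 1 : Nat) : Int) := by push_cast; ring
  rw [h1, PySem.List.pyGet?_neg_natCast _ _ (by omega) (by omega)]
  have h2 : mid.length - (i + 1) = mid.length - 1 - i := by omega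
  rw [h2, List.getElem?_eq_getElem (by omega)]

theorem zipLoopA_shift (a b : Char) (mid : List Char) :
    ∀ n i z (v : Bool), mid.length / 2 - i ≤ n →
      zipLoopA (a :: (mid ++ [b])) (mid.length / 2 + 1) (i + 1) z v =
      zipLoopA mid (mid.length / 2) i z v := by
  intro n
  induction n with
  | zero =>
      intro i z v hle
      rw [zipLoopA_stop _ _ _ _ _ (by rintro ⟨h, _⟩; omega),
          zipLoopA_stop _ _ _ _ _ (by rintro ⟨h, _⟩; omega)]
  | succ n ih =>
      intro i z v hle
      by_cases hc : i < mid.length / 2 ∧ v = true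
      · obtain ⟨hlt, hv⟩ := hc
        subst hv
        have hi : i < mid.length := by omega
        rw [zipLoopA_step _ _ _ z (by omega), zipLoopA_step _ _ _ z hlt]
        have e1 : (((i + 1 : Nat) : Int)) = ((i : Int) + 1) := by push_cast; ring
        rw [e1, pyGet?_wrap_pos a b mid i hi, pyGet?_wrap_neg a b mid i hi,
            PySem.List.pyGet?_natCast, List.getElem?_eq_getElem hi,
            pyGet?_neg_mid mid i hi]
        simp only
        by_cases hp : possiblePair mid[i] mid[mid.length - 1 - i]
        · rw [if_pos hp, if_pos hp]
          exact ih (i + 1) (z + 1) true (by omega)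
        · rw [if_neg hp, if_neg hp]
          exact ih (i + 1) z false (by omega)
      · rw [zipLoopA_stop _ _ _ _ _ (by rintro ⟨h, hv⟩; exact hc ⟨by omega, hv⟩),
            zipLoopA_stop _ _ _ _ _ hc]

theorem zip_main : ∀ n (g : List Char), g.length ≤ n →
    zipLoopA g (g.length / 2) 0 0 true = zipRecB g := by
  intro n
  induction n with
  | zero =>
      intro g hg
      have : g = [] := List.eq_nil_of_length_eq_zero (by omega)
      subst this
      rw [zipLoopA_stop _ _ _ _ _ (by simp)]
      rw [zipRecB.eq_def]
  | succ n ih =>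
      intro g hg
      match g with
      | [] =>
          rw [zipLoopA_stop _ _ _ _ _ (by simp)]
          rw [zipRecB.eq_def]
      | [x] =>
          rw [zipLoopA_stop _ _ _ _ _ (by simp)]
          rw [zipRecB.eq_def]
      | a :: c :: rest =>
          set t := c :: rest with ht
          have htne : t ≠ [] := by simp [ht]
          have hdec : t.dropLast ++ [t.getLast htne] = t := List.dropLast_append_getLast htne
          set mid := t.dropLast with hmid
          set b := t.getLast htne with hb
          have hBeq : zipRecB (a :: t) = if possiblePair a b then 1 + zipRecB mid else 0 := by
            rw [ht, zipRecB.eq_def]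
          have hglen : (a :: t).length = mid.length + 2 := by
            rw [← hdec]; simp
          have hhalf : (a :: t).length / 2 = mid.length / 2 + 1 := by omega
          have hshape : a :: t = a :: (mid ++ [b]) := by rw [hdec]
          rw [hBeq, hhalf, zipLoopA_step _ _ _ _ (by omega), hshape]
          have hget0 : PySem.List.pyGet? (a :: (mid ++ [b])) ((0 : Nat) : Int) = some a := by
            rw [PySem.List.pyGet?_natCast]; simp
          have hgetneg : PySem.List.pyGet? (a :: (mid ++ [b])) (-(((0 : Nat) : Int) + 1)) = some b := by
            have h0 : (-(((0 : Nat) : Int) + 1)) = (-1 : Int) := by norm_num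
            rw [h0, PySem.List.pyGet?_neg_one,
               show a :: (mid ++ [b]) = (a :: mid) ++ [b] by simp,
               List.getLast?_concat]
          rw [hget0, hgetneg]
          simp only
          have hmidlen : mid.length ≤ n := by
            have h1 : t.length ≤ n := by simpa using hg
            have h2 : mid.length + 1 = t.length := by
              rw [← hdec]; simp
            omega
          by_cases hp : possiblePair a b
          · rw [if_pos hp, if_pos hp,
                zipLoopA_shift a b mid (mid.length / 2) 0 (0 + 1) true (by omega),
                zipLoopA_acc mid (mid.length / 2) (mid.length / 2) 0 (by omega) (0 + 1),
                ih mid hmidlen]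
            ring
          · rw [if_neg hp, if_neg hp, zipLoopA_false]

-- ===== VERDICT (by name: the statement is the Claim_ definition above) =====
theorem zip_length_spec : Claim_equal_zip_length := by
  intro gene _
  unfold Spec_zip_length zip_length zip_length_alt
  exact zip_main gene.toList.length gene.toList le_rfl
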